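-- pv_equiv track=rewrite | github.com/iamheretodevelop/creators-domain | CS100/row_col_sum.py | given_sum
-- ===== SOURCE A (Python) =====
-- def given_sum(lst, val):
--     row_number = 0
--     col_number = 0
--     if len(lst) == 0:
--         return 0
--     for row in range(len(lst)):
--         row_sum = 0
--         for col in range(len(lst[0])):
--             row_sum += lst[row][col]
--         if row_sum == val:
--             row_number += row + 1
--
--     for row in range(len(lst[0])):
--         col_sum = 0
--         for col in range(len(lst)):
--             col_sum += lst[col][row]
--         if col_sum == val:
--             col_number += row + 1
--     return row_number + col_number
-- ===== SOURCE B (Python) =====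
-- def given_sum(lst, val):
--     if len(lst) == 0:
--         return 0
--     m = len(lst[0])
--     col_sums = [0] * m
--     total = 0
--     for i, row in enumerate(lst):
--         s = 0
--         for j in range(m):
--             s += row[j]
--             col_sums[j] = col_sums[j] + row[j]
--         if s == val:
--             total += i + 1
--     for j, c in enumerate(col_sums):
--         if c == val:
--             total += j + 1
--     return total
-- ===== Notes on version B (the rewrite author's own statement) =====
-- stated objective: alternative
-- what changed: Single pass over the matrix that accumulates a col_sums table (checking each row sum as its row is traversed), replacing A's second transposed scan that recomputes every column sum with nested loops; column indices are then scored from the table.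
import Mathlib
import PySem

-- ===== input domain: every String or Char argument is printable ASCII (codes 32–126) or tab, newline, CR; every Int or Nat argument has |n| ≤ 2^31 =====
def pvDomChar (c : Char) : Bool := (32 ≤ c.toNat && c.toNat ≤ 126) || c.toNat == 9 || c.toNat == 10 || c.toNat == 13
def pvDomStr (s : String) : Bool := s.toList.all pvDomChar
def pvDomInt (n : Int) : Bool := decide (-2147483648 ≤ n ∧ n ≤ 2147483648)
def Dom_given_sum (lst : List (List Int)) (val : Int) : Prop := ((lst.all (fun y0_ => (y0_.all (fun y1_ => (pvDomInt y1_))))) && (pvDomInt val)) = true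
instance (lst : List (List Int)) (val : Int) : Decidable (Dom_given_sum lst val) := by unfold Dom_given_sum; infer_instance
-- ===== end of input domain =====

-- B changes the decomposition (one pass building a col_sums table instead of a second
-- transposed nested scan); equivalence is about the return value; no argument is mutated.

-- ===== PORT A =====
def given_sum (lst : List (List Int)) (val : Int) : Int :=
  if lst.length = 0 then 0
  else
    let row_number :=
      (PySem.List.pyRange 0 (lst.length : Int) 1).foldl (fun rn row =>
        let row_sum :=
          (PySem.List.pyRange 0 ((PySem.List.pyGetD lst 0 []).length : Int) 1).foldl
            (fun s col => s + PySem.List.pyGetD (PySem.List.pyGetD lst row []) col 0) 0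
        if row_sum = val then rn + (row + 1) else rn) 0
    let col_number :=
      (PySem.List.pyRange 0 ((PySem.List.pyGetD lst 0 []).length : Int) 1).foldl (fun cn row =>
        let col_sum :=
          (PySem.List.pyRange 0 (lst.length : Int) 1).foldl
            (fun s col => s + PySem.List.pyGetD (PySem.List.pyGetD lst col []) row 0) 0
        if col_sum = val then cn + (row + 1) else cn) 0
    row_number + col_number

-- ===== PORT B =====
def given_sum_alt (lst : List (List Int)) (val : Int) : Int :=
  if lst.length = 0 then 0
  else
    let m := (PySem.List.pyGetD lst 0 []).length
    let st :=
      (PySem.List.enumerate lst).foldl (fun (st : Int × List Int) p =>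
        let inner :=
          (PySem.List.pyRange 0 (m : Int) 1).foldl (fun (q : Int × List Int) j =>
            (q.1 + PySem.List.pyGetD p.2 j 0,
             PySem.List.pySetD q.2 j (PySem.List.pyGetD q.2 j 0 + PySem.List.pyGetD p.2 j 0)))
            ((0 : Int), st.2)
        (if inner.1 = val then st.1 + (p.1 + 1) else st.1, inner.2))
        ((0 : Int), List.replicate m (0 : Int))
    (PySem.List.enumerate st.2).foldl
      (fun t p => if p.2 = val then t + (p.1 + 1) else t) st.1

-- ===== PRECONDITION & SPEC =====
-- A indexes every row at columns 0..len(lst[0])-1 (in both scans) and raises IndexError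
-- when some row is shorter than the first; Pre_ excludes exactly those ragged inputs.
def Pre_given_sum (lst : List (List Int)) (val : Int) : Prop :=
  ∀ r ∈ lst, (lst.headD []).length ≤ r.length
instance (lst : List (List Int)) (val : Int) : Decidable (Pre_given_sum lst val) := by
  unfold Pre_given_sum; infer_instance
def pvWitness_given_sum : List (List Int) × Int := ([[1, 2], [3, 4]], 3)

def Spec_given_sum (lst : List (List Int)) (val : Int) (out : Int) : Prop := out = given_sum_alt lst val
instance (lst : List (List Int)) (val : Int) (out : Int) : Decidable (Spec_given_sum lst val out) := by unfold Spec_given_sum; infer_instance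

-- ===== CLAIM (what is proved, stated in full; the proofs are below) =====
def Claim_equal_given_sum : Prop := ∀ (lst : List (List Int)) (val : Int), Dom_given_sum lst val → Pre_given_sum lst val → Spec_given_sum lst val (given_sum lst val)

-- ===== LEMMAS AND PROOFS =====

-- proof-side helpers: row/column sums
def pvS (r : List Int) (k : Nat) : Int := ((List.range k).map (fun j => r.getD j 0)).sum
def pvC (lst : List (List Int)) (j : Nat) : Int := (lst.map (fun r => r.getD j 0)).sum

theorem pv_foldl_ite_add {α : Type} (l : List α) (p : α → Prop) [DecidablePred p]
    (g : α → Int) (a : Int) :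
    l.foldl (fun acc x => if p x then acc + g x else acc) a
      = a + (l.map (fun x => if p x then g x else 0)).sum := by
  induction l generalizing a with
  | nil => simp
  | cons x xs ih =>
    simp only [List.foldl_cons, List.map_cons, List.sum_cons, ih]
    split <;> ring

theorem pv_map_range_getD {α β : Type} (l : List α) (d : α) (f : α → β) :
    (List.range l.length).map (fun i => f (l.getD i d)) = l.map f := by
  apply List.ext_getElem
  · simp
  · intro i h1 h2
    simp only [List.getElem_map, List.getElem_range]
    have h3 : i < l.length := by simpa using h1
    rw [List.getD_eq_getElem?_getD, List.getElem?_eq_getElem h3]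
    rfl

theorem pvS_succ (r : List Int) (k : Nat) :
    pvS r (k + 1) = pvS r k + r.getD k 0 := by
  simp [pvS, List.range_succ]

-- inner loop of B: one row r folded over range m, accumulating the row sum and
-- bumping the first k column accumulators
theorem pv_innerB (r : List Int) (val : Int) :
    ∀ (k : Nat) (s : Int) (cs : List Int), k ≤ cs.length →
    (((PySem.List.pyRange 0 (k : Int) 1).foldl
        (fun (q : Int × List Int) j =>
          (q.1 + PySem.List.pyGetD r j 0,
           PySem.List.pySetD q.2 j (PySem.List.pyGetD q.2 j 0 + PySem.List.pyGetD r j 0)))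
        (s, cs)).1 = s + pvS r k)
    ∧ (((PySem.List.pyRange 0 (k : Int) 1).foldl
        (fun (q : Int × List Int) j =>
          (q.1 + PySem.List.pyGetD r j 0,
           PySem.List.pySetD q.2 j (PySem.List.pyGetD q.2 j 0 + PySem.List.pyGetD r j 0)))
        (s, cs)).2.length = cs.length)
    ∧ ∀ j : Nat,
        (((PySem.List.pyRange 0 (k : Int) 1).foldl
          (fun (q : Int × List Int) j =>
            (q.1 + PySem.List.pyGetD r j 0,
             PySem.List.pySetD q.2 j (PySem.List.pyGetD q.2 j 0 + PySem.List.pyGetD r j 0)))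
          (s, cs)).2.getD j 0
          = if j < k then cs.getD j 0 + r.getD j 0 else cs.getD j 0) := by
  intro k
  induction k with
  | zero =>
    intro s cs _
    simp [PySem.List.pyRange_one_eq_nil, pvS]
  | succ k ih =>
    intro s cs hk
    have hk' : k ≤ cs.length := Nat.le_of_succ_le hk
    obtain ⟨h1, h2, h3⟩ := ih s cs hk'
    have hrange : PySem.List.pyRange 0 ((k + 1 : Nat) : Int) 1
        = PySem.List.pyRange 0 (k : Int) 1 ++ [(k : Int)] := by
      push_cast
      exact PySem.List.pyRange_one_succ_right (by positivity)
    rw [hrange, List.foldl_append]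
    set res := (PySem.List.pyRange 0 (k : Int) 1).foldl
        (fun (q : Int × List Int) j =>
          (q.1 + PySem.List.pyGetD r j 0,
           PySem.List.pySetD q.2 j (PySem.List.pyGetD q.2 j 0 + PySem.List.pyGetD r j 0)))
        (s, cs) with hres
    have hklt : k < res.2.length := by omega
    refine ⟨?_, ?_, ?_⟩
    · simp only [List.foldl_cons, List.foldl_nil, PySem.List.pyGetD_natCast, h1, pvS_succ]
      ring
    · simp [List.foldl_cons, List.length_set]
      omega
    · intro j
      simp only [List.foldl_cons, List.foldl_nil, PySem.List.pySetD_natCast,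
        PySem.List.pyGetD_natCast]
      rcases eq_or_ne j k with rfl | hne
      · rw [List.getD_eq_getElem?_getD, List.getElem?_set_self (by omega)]
        have hv := h3 j
        simp only [lt_irrefl, if_false] at hv
        simp only [List.getD_eq_getElem?_getD] at hv ⊢
        simp [hv]
      · rw [List.getD_eq_getElem?_getD, List.getElem?_set_ne (by omega)]
        rw [← List.getD_eq_getElem?_getD, h3]
        by_cases hj : j < k
        · simp [hj, (show j < k + 1 by omega)]
        · simp [hj, (show ¬ j < k + 1 by omega)]

-- outer loop of B over enumerate lst
theorem pv_outerB (m : Nat) (val : Int) :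
    ∀ (lst : List (List Int)) (s0 t : Int) (cs : List Int), cs.length = m →
    (((PySem.List.enumerate lst s0).foldl (fun (st : Int × List Int) p =>
        let inner :=
          (PySem.List.pyRange 0 (m : Int) 1).foldl (fun (q : Int × List Int) j =>
            (q.1 + PySem.List.pyGetD p.2 j 0,
             PySem.List.pySetD q.2 j (PySem.List.pyGetD q.2 j 0 + PySem.List.pyGetD p.2 j 0)))
            ((0 : Int), st.2)
        (if inner.1 = val then st.1 + (p.1 + 1) else st.1, inner.2)) (t, cs)).1
      = t + ((List.range lst.length).map
          (fun i => if pvS (lst.getD i []) m = val then (s0 + (i : Int)) + 1 else 0)).sum)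
    ∧ (((PySem.List.enumerate lst s0).foldl (fun (st : Int × List Int) p =>
        let inner :=
          (PySem.List.pyRange 0 (m : Int) 1).foldl (fun (q : Int × List Int) j =>
            (q.1 + PySem.List.pyGetD p.2 j 0,
             PySem.List.pySetD q.2 j (PySem.List.pyGetD q.2 j 0 + PySem.List.pyGetD p.2 j 0)))
            ((0 : Int), st.2)
        (if inner.1 = val then st.1 + (p.1 + 1) else st.1, inner.2)) (t, cs)).2.length = m)
    ∧ ∀ j : Nat, j < m →
      (((PySem.List.enumerate lst s0).foldl (fun (st : Int × List Int) p =>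
        let inner :=
          (PySem.List.pyRange 0 (m : Int) 1).foldl (fun (q : Int × List Int) j =>
            (q.1 + PySem.List.pyGetD p.2 j 0,
             PySem.List.pySetD q.2 j (PySem.List.pyGetD q.2 j 0 + PySem.List.pyGetD p.2 j 0)))
            ((0 : Int), st.2)
        (if inner.1 = val then st.1 + (p.1 + 1) else st.1, inner.2)) (t, cs)).2.getD j 0
        = cs.getD j 0 + pvC lst j) := by
  intro lst
  induction lst with
  | nil => intro s0 t cs hcs; simp [PySem.List.enumerate_nil, pvC, hcs]
  | cons r rest ih =>
    intro s0 t cs hcs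
    rw [PySem.List.enumerate_cons]
    simp only [List.foldl_cons]
    obtain ⟨i1, i2, i3⟩ := pv_innerB r val m 0 cs (by omega)
    obtain ⟨o1, o2, o3⟩ := ih (s0 + 1)
      (if ((PySem.List.pyRange 0 (m : Int) 1).foldl (fun (q : Int × List Int) j =>
            (q.1 + PySem.List.pyGetD r j 0,
             PySem.List.pySetD q.2 j (PySem.List.pyGetD q.2 j 0 + PySem.List.pyGetD r j 0)))
            ((0 : Int), cs)).1 = val then t + (s0 + 1) else t)
      ((PySem.List.pyRange 0 (m : Int) 1).foldl (fun (q : Int × List Int) j =>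
            (q.1 + PySem.List.pyGetD r j 0,
             PySem.List.pySetD q.2 j (PySem.List.pyGetD q.2 j 0 + PySem.List.pyGetD r j 0)))
            ((0 : Int), cs)).2
      (by rw [i2, hcs])
    refine ⟨?_, o2, ?_⟩
    · rw [o1]
      rw [i1] at *
      simp only [zero_add, List.length_cons]
      rw [List.range_succ_eq_map]
      simp only [List.map_cons, List.map_map, List.sum_cons, List.getD_cons_zero]
      have hmap : ∀ i ∈ List.range rest.length,
          ((fun i => if pvS ((r :: rest).getD i []) m = val then (s0 + (i : Int)) + 1 else 0) ∘ Nat.succ) i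
            = (fun i => if pvS (rest.getD i []) m = val then ((s0 + 1) + (i : Int)) + 1 else 0) i := by
        intro i _
        simp only [Function.comp]
        have : ((Nat.succ i : Nat) : Int) = (i : Int) + 1 := by push_cast; ring
        simp only [List.getD_cons_succ, this]
        split <;> [ring; rfl]
      rw [List.map_congr_left hmap]
      split <;> simp <;> ring
    · intro j hj
      rw [o3 j hj, i3 j]
      simp only [if_pos (by omega : j < m)]
      have : pvC (r :: rest) j = r.getD j 0 + pvC rest j := by simp [pvC]
      rw [this]; ring

theorem pv_finalB (xs : List Int) (val t : Int) :
    (PySem.List.enumerate xs).foldl (fun t p => if p.2 = val then t + (p.1 + 1) else t) t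
      = t + ((List.range xs.length).map
          (fun j => if xs.getD j 0 = val then (j : Int) + 1 else 0)).sum := by
  rw [PySem.List.enumerate_eq_map_pyRange xs 0]
  simp only [PySem.List.len, PySem.List.pyRange_zero_natCast, List.map_map, List.foldl_map,
    Function.comp, PySem.List.pyGetD_natCast]
  exact pv_foldl_ite_add (List.range xs.length) (fun j => xs.getD j 0 = val) (fun j => (j : Int) + 1) t

theorem pv_sum_ite_congr (k : Nat) (f g : Nat → Int) (h : ∀ j < k, f j = g j) :
    ((List.range k).map f).sum = ((List.range k).map g).sum := by
  rw [List.map_congr_left (fun j hj => h j (List.mem_range.mp hj))]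

theorem pv_altB (r0 : List Int) (rest : List (List Int)) (val : Int) :
    given_sum_alt (r0 :: rest) val
      = ((List.range (rest.length + 1)).map
          (fun i => if pvS ((r0 :: rest).getD i []) r0.length = val then (i : Int) + 1 else 0)).sum
        + ((List.range r0.length).map
          (fun j => if pvC (r0 :: rest) j = val then (j : Int) + 1 else 0)).sum := by
  obtain ⟨b1, b2, b3⟩ := pv_outerB r0.length val (r0 :: rest) 0 0 (List.replicate r0.length 0) (by simp)
  unfold given_sum_alt
  simp only [List.length_cons, Nat.succ_ne_zero, if_false, PySem.List.pyGetD_zero_cons] at b1 b2 b3 ⊢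
  rw [pv_finalB, b1, b2]
  congr 1
  · simp only [zero_add]
  · exact pv_sum_ite_congr _ _ _ (fun j hj => by
      rw [b3 j hj]; simp)

theorem pv_A (r0 : List Int) (rest : List (List Int)) (val : Int) :
    given_sum (r0 :: rest) val
      = ((List.range (rest.length + 1)).map
          (fun i => if pvS ((r0 :: rest).getD i []) r0.length = val then (i : Int) + 1 else 0)).sum
        + ((List.range r0.length).map
          (fun j => if pvC (r0 :: rest) j = val then (j : Int) + 1 else 0)).sum := by
  unfold given_sum
  simp only [List.length_cons, Nat.succ_ne_zero, if_false, PySem.List.pyGetD_zero_cons,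
    PySem.List.pyRange_zero_natCast, List.foldl_map, PySem.List.pyGetD_natCast,
    PySem.List.foldl_add, zero_add]
  rw [pv_foldl_ite_add, pv_foldl_ite_add]
  simp only [zero_add]
  exact congrArg₂ (· + ·)
    (pv_sum_ite_congr _ _ _ (fun i _ => by simp [pvS]))
    (pv_sum_ite_congr _ _ _ (fun j _ => by
      have hm := pv_map_range_getD (r0 :: rest) [] (fun r => r.getD j 0)
      simp only [List.length_cons] at hm
      simp only [pvC, ← hm]))

theorem given_sum_main (lst : List (List Int)) (val : Int) :
    given_sum lst val = given_sum_alt lst val := by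
  cases lst with
  | nil => rfl
  | cons r0 rest => rw [pv_A, pv_altB]

-- ===== VERDICT (by name: the statement is the Claim_ definition above) =====
theorem given_sum_spec : Claim_equal_given_sum := by
  intro lst val _ _
  unfold Spec_given_sum
  exact given_sum_main lst val
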